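-- pv_equiv track=rewrite | github.com/Pintized/CS449-Spring-Project | peg_game.py | _build_diamond_board
-- ===== SOURCE A (Python) =====
-- def _build_diamond_board(n):
--     board = [[1 for _ in range(n)] for _ in range(n)]
--     mid = n // 2
--     for r in range(n):
--         for c in range(n):
--             if abs(r - mid) + abs(c - mid) > mid:
--                 board[r][c] = -1
--     board[mid][mid] = 0
--     return board
-- ===== SOURCE B (Python) =====
-- def _build_diamond_board(n):
--     mid = n // 2
--     board = [[-1] * n for _ in range(n)]
--     for r in range(n):
--         d = mid - abs(r - mid)
--         lo = mid - d
--         hi = min(n - 1, mid + d)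
--         board[r][lo:hi + 1] = [1] * (hi - lo + 1)
--     board[mid][mid] = 0
--     return board
-- ===== Notes on version B (the rewrite author's own statement) =====
-- stated objective: alternative
-- what changed: B computes each row's contiguous 1-span arithmetically (d = mid - |r-mid|, clamped slice assignment of [1]*len into an all -1 board) instead of testing every cell's Manhattan distance in a nested loop.
import Mathlib
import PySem

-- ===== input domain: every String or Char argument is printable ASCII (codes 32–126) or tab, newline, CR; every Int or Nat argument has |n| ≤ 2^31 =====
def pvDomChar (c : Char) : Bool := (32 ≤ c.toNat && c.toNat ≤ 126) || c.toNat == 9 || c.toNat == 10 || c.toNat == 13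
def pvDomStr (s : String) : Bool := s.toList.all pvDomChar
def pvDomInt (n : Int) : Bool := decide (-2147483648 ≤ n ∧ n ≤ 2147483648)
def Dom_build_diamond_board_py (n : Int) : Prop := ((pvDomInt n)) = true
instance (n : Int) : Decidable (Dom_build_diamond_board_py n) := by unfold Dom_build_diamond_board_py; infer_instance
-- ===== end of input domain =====

-- B replaces A's per-cell Manhattan-distance test with per-row arithmetic span filling (alternative decomposition; same asymptotic cost).

-- ===== PORT A =====
def build_diamond_board_py (n : Int) : List (List Int) :=
  let board : List (List Int) :=
    (PySem.List.pyRange 0 n 1).map (fun _ => (PySem.List.pyRange 0 n 1).map (fun _ => (1 : Int)))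
  let mid : Int := PySem.Int.floordiv n 2
  let board := (PySem.List.pyRange 0 n 1).foldl (fun b r =>
    (PySem.List.pyRange 0 n 1).foldl (fun b c =>
      if |r - mid| + |c - mid| > mid then
        PySem.List.pySetD b r (PySem.List.pySetD (PySem.List.pyGetD b r []) c (-1))
      else b) b) board
  PySem.List.pySetD board mid (PySem.List.pySetD (PySem.List.pyGetD board mid []) mid 0)

-- ===== PORT B =====
def build_diamond_board_py_alt (n : Int) : List (List Int) :=
  let mid : Int := PySem.Int.floordiv n 2
  let board : List (List Int) :=
    (PySem.List.pyRange 0 n 1).map (fun _ => List.replicate n.toNat (-1 : Int))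
  let board := (PySem.List.pyRange 0 n 1).foldl (fun b r =>
    let d := mid - |r - mid|
    let lo := mid - d
    let hi := min (n - 1) (mid + d)
    let row := PySem.List.pyGetD b r []
    -- slice assignment row[lo:hi+1] = [1]*(hi-lo+1)
    PySem.List.pySetD b r
      (PySem.List.slice row none (some lo) ++ List.replicate (hi - lo + 1).toNat (1 : Int) ++
        PySem.List.slice row (some (hi + 1)) none)) board
  PySem.List.pySetD board mid (PySem.List.pySetD (PySem.List.pyGetD board mid []) mid 0)

-- ===== PRECONDITION & SPEC =====
-- A (and B) raise IndexError at board[mid][mid] for n ≤ 0 (empty board / negative mid).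
def Pre_build_diamond_board_py (n : Int) : Prop := 1 ≤ n
instance (n : Int) : Decidable (Pre_build_diamond_board_py n) := by unfold Pre_build_diamond_board_py; infer_instance
def pvWitness_build_diamond_board_py : Int := 5

def Spec_build_diamond_board_py (n : Int) (out : List (List Int)) : Prop := out = build_diamond_board_py_alt n
instance (n : Int) (out : List (List Int)) : Decidable (Spec_build_diamond_board_py n out) := by unfold Spec_build_diamond_board_py; infer_instance

-- ===== CLAIM (what is proved, stated in full; the proofs are below) =====
def Claim_equal_build_diamond_board_py : Prop := ∀ (n : Int), Dom_build_diamond_board_py n → Pre_build_diamond_board_py n → Spec_build_diamond_board_py n (build_diamond_board_py n)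

-- ===== LEMMAS AND PROOFS =====

theorem pv_foldl_congr_inv {α β : Type} (P : α → Prop) (f g : α → β → α) :
    ∀ (l : List β) (a : α), P a → (∀ a b, P a → b ∈ l → P (f a b)) →
      (∀ a b, P a → b ∈ l → f a b = g a b) → l.foldl f a = l.foldl g a := by
  intro l
  induction l with
  | nil => intro a _ _ _; rfl
  | cons x xs ih =>
    intro a hP hcl hfg
    simp only [List.foldl_cons]
    rw [show g a x = f a x from (hfg a x hP List.mem_cons_self).symm]
    exact ih (f a x) (hcl a x hP List.mem_cons_self)
      (fun a b hb hm => hcl a b hb (List.mem_cons_of_mem _ hm))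
      (fun a b hb hm => hfg a b hb (List.mem_cons_of_mem _ hm))

theorem pv_foldl_length_inv {α β : Type} (f : List α → β → List α)
    (h : ∀ b x, (f b x).length = b.length) :
    ∀ (l : List β) (b : List α), (l.foldl f b).length = b.length := by
  intro l
  induction l with
  | nil => intro b; rfl
  | cons x xs ih => intro b; rw [List.foldl_cons, ih, h]

theorem pv_foldl_set_getD_range {α : Type} (d : α) (g : Nat → α → α) :
    ∀ (m : Nat) (xs : List α), m ≤ xs.length →
      (List.range m).foldl (fun b i => b.set i (g i (b.getD i d))) xs
        = (xs.take m).mapIdx (fun i x => g i x) ++ xs.drop m := by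
  intro m
  induction m with
  | zero => intro xs _; simp
  | succ m ih =>
    intro xs hm
    rw [List.range_succ, List.foldl_append, ih xs (by omega)]
    simp only [List.foldl_cons, List.foldl_nil]
    have hlen : ((xs.take m).mapIdx (fun i x => g i x)).length = m := by
      simp [List.length_take]; omega
    have hdrop : xs.drop m = xs[m] :: xs.drop (m+1) := by
      exact List.drop_eq_getElem_cons (by omega)
    have hgetD : ((xs.take m).mapIdx (fun i x => g i x) ++ xs.drop m).getD m d = xs[m] := by
      rw [hdrop, List.getD_eq_getElem?_getD, List.getElem?_append_right (by omega), hlen]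
      simp only [Nat.sub_self, List.getElem?_cons_zero, Option.getD_some]
    rw [hgetD, hdrop, List.set_append_right _ _ (by omega), hlen]
    simp only [Nat.sub_self, List.set_cons_zero]
    rw [List.take_add_one, List.getElem?_eq_getElem (by omega)]
    rw [List.mapIdx_append]
    simp [List.length_take, Nat.min_eq_left (by omega : m ≤ xs.length)]
    rfl

theorem pv_inner_collapse {α β : Type} (d : α) (p : β → Prop) [DecidablePred p]
    (u : α → β → α) :
    ∀ (cs : List β) (b : List α) (r : Nat), r < b.length →
      cs.foldl (fun b c => if p c then b.set r (u (b.getD r d) c) else b) b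
        = b.set r (cs.foldl (fun row c => if p c then u row c else row) (b.getD r d)) := by
  intro cs
  induction cs with
  | nil =>
    intro b r hr
    rw [List.foldl_nil, List.foldl_nil, List.getD_eq_getElem?_getD, List.getElem?_eq_getElem hr,
      Option.getD_some, List.set_getElem_self]
  | cons c cs ih =>
    intro b r hr
    simp only [List.foldl_cons]
    by_cases hp : p c
    · simp only [if_pos hp]
      have hset : (b.set r (u (b.getD r d) c)).getD r d = u (b.getD r d) c := by
        rw [List.getD_eq_getElem?_getD, List.getElem?_set_self (by simpa using hr), Option.getD_some]
      rw [ih _ r (by simpa using hr), hset, List.set_set]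
    · simp only [if_neg hp]
      exact ih b r hr

theorem pv_pyRange_eq (n : Int) :
    (PySem.List.pyRange 0 n 1) = (List.range n.toNat).map (Nat.cast : Nat → Int) := by
  rw [PySem.List.pyRange_one]
  simp only [Int.sub_zero, zero_add]

theorem pv_getElem_rep3 {α : Type} (x y : α) (p q r j : Nat)
    (hj : j < (List.replicate p x ++ List.replicate q y ++ List.replicate r x).length) :
    (List.replicate p x ++ List.replicate q y ++ List.replicate r x)[j]
      = if p ≤ j ∧ j < p + q then y else x := by
  have hj' : j < p + q + r := by simp at hj; omega
  by_cases h1 : j < p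
  · rw [List.getElem_append_left (by simp; omega), List.getElem_append_left (by simp; omega),
      List.getElem_replicate, if_neg (by omega)]
  · by_cases h2 : j < p + q
    · rw [List.getElem_append_left (by simp; omega), List.getElem_append_right (by simp; omega),
        List.getElem_replicate, if_pos (by omega)]
    · rw [List.getElem_append_right (by simp; omega), List.getElem_replicate, if_neg (by omega)]

-- row-level equality
theorem pv_row_eq (n : Int) (hn : 1 ≤ n) (k : Nat) (hk : k < n.toNat) :
    (List.range n.toNat).foldl
      (fun (row : List Int) (j : Nat) => if PySem.Int.floordiv n 2 < |(k : Int) - PySem.Int.floordiv n 2| + |(j : Int) - PySem.Int.floordiv n 2| then row.set j (-1) else row)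
      ((List.range n.toNat).map (fun _ => (1 : Int)))
    = (PySem.List.slice (List.replicate n.toNat (-1 : Int)) none
        (some (PySem.Int.floordiv n 2 - (PySem.Int.floordiv n 2 - |(k : Int) - PySem.Int.floordiv n 2|))) ++
       List.replicate ((min (n - 1) (PySem.Int.floordiv n 2 + (PySem.Int.floordiv n 2 - |(k : Int) - PySem.Int.floordiv n 2|)) -
          (PySem.Int.floordiv n 2 - (PySem.Int.floordiv n 2 - |(k : Int) - PySem.Int.floordiv n 2|)) + 1)).toNat (1 : Int) ++
       PySem.List.slice (List.replicate n.toNat (-1 : Int))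
        (some (min (n - 1) (PySem.Int.floordiv n 2 + (PySem.Int.floordiv n 2 - |(k : Int) - PySem.Int.floordiv n 2|)) + 1)) none) := by
  have hmid : PySem.Int.floordiv n 2 = n / 2 := PySem.Int.floordiv_eq_ediv_of_pos (by omega)
  set mid := PySem.Int.floordiv n 2 with hmd
  set a := |(k : Int) - mid| with ha
  have ha0 : 0 ≤ a := abs_nonneg _
  have hac : a = (k : Int) - mid ∨ a = -((k : Int) - mid) := abs_choice _
  have hkn : (k : Int) < n := by omega
  have halemid : a ≤ mid := by rcases hac with h | h <;> omega
  have hlo : mid - (mid - a) = a := by ring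
  rw [hlo]
  set hi := min (n - 1) (mid + (mid - a)) with hhi
  have hhi1 : a ≤ hi := by omega
  have hhi2 : hi ≤ n - 1 := by omega
  rw [PySem.List.slice_to _ ha0, PySem.List.slice_from _ (by omega : (0:Int) ≤ hi + 1),
    List.take_replicate, List.drop_replicate]
  -- collapse the LHS fold to a mapIdx
  have h1 : (List.range n.toNat).foldl
      (fun (row : List Int) (j : Nat) =>
        if mid < a + |(j : Int) - mid| then row.set j (-1) else row)
      ((List.range n.toNat).map (fun _ => (1 : Int)))
    = (List.range n.toNat).foldl
      (fun (row : List Int) (j : Nat) =>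
        row.set j (if mid < a + |(j : Int) - mid| then (-1) else row.getD j 0))
      ((List.range n.toNat).map (fun _ => (1 : Int))) := by
    apply pv_foldl_congr_inv (fun (row : List Int) => row.length = n.toNat)
    · simp
    · intro row j hlen hj
      dsimp only
      split <;> simp [hlen]
    · intro row j hlen hj
      dsimp only
      split
      · rfl
      · rw [List.getD_eq_getElem?_getD,
          List.getElem?_eq_getElem (by rw [hlen]; exact List.mem_range.mp hj),
          Option.getD_some, List.set_getElem_self]
  rw [h1, pv_foldl_set_getD_range 0
      (fun (j : Nat) (x : Int) => if mid < a + |(j : Int) - mid| then (-1) else x)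
      n.toNat _ (by simp),
    List.take_of_length_le (by simp), List.drop_eq_nil_of_le (by simp), List.append_nil]
  apply List.ext_getElem
  · simp
    omega
  · intro j hj1 hj2
    have hjn : j < n.toNat := by simpa using hj1
    have haj0 : (0:Int) ≤ |(j : Int) - mid| := abs_nonneg _
    have hajc : |(j : Int) - mid| = (j : Int) - mid ∨ |(j : Int) - mid| = -((j : Int) - mid) :=
      abs_choice _
    rw [List.getElem_mapIdx, pv_getElem_rep3 _ _ _ _ _ _ hj2]
    simp only [List.getElem_map]
    split
    · rw [if_neg]
      rcases hac with h | h <;> rcases hajc with h' | h' <;> omega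
    · rw [if_pos]
      rcases hac with h | h <;> rcases hajc with h' | h' <;> omega

theorem pv_boards_eq (n : Int) (hn : 1 ≤ n) :
    ((PySem.List.pyRange 0 n 1).foldl (fun b r =>
      (PySem.List.pyRange 0 n 1).foldl (fun b c =>
        if |r - (PySem.Int.floordiv n 2)| + |c - (PySem.Int.floordiv n 2)| > PySem.Int.floordiv n 2 then
          PySem.List.pySetD b r (PySem.List.pySetD (PySem.List.pyGetD b r []) c (-1))
        else b) b)
      ((PySem.List.pyRange 0 n 1).map (fun _ => (PySem.List.pyRange 0 n 1).map (fun _ => (1 : Int)))))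
    = ((PySem.List.pyRange 0 n 1).foldl (fun b r =>
        PySem.List.pySetD b r
          (PySem.List.slice (PySem.List.pyGetD b r []) none (some ((PySem.Int.floordiv n 2) - ((PySem.Int.floordiv n 2) - |r - (PySem.Int.floordiv n 2)|))) ++
            List.replicate ((min (n - 1) ((PySem.Int.floordiv n 2) + ((PySem.Int.floordiv n 2) - |r - (PySem.Int.floordiv n 2)|)) - ((PySem.Int.floordiv n 2) - ((PySem.Int.floordiv n 2) - |r - (PySem.Int.floordiv n 2)|)) + 1)).toNat (1 : Int) ++
            PySem.List.slice (PySem.List.pyGetD b r []) (some ((min (n - 1) ((PySem.Int.floordiv n 2) + ((PySem.Int.floordiv n 2) - |r - (PySem.Int.floordiv n 2)|))) + 1)) none))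
        ((PySem.List.pyRange 0 n 1).map (fun _ => List.replicate n.toNat (-1 : Int)))) := by
  rw [pv_pyRange_eq n]
  simp only [List.foldl_map, List.map_map, PySem.List.pySetD_natCast, PySem.List.pyGetD_natCast,
    Function.comp_def, gt_iff_lt]
  have hA1 : (List.range n.toNat).foldl
      (fun (b : List (List Int)) (k : Nat) =>
        (List.range n.toNat).foldl
          (fun (b : List (List Int)) (j : Nat) =>
            if PySem.Int.floordiv n 2 < |(k : Int) - PySem.Int.floordiv n 2| + |(j : Int) - PySem.Int.floordiv n 2| then
              b.set k ((b.getD k []).set j (-1))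
            else b) b)
      (List.map (fun _ => List.map (fun _ => (1 : Int)) (List.range n.toNat)) (List.range n.toNat))
    = (List.range n.toNat).foldl
      (fun (b : List (List Int)) (k : Nat) =>
        b.set k ((List.range n.toNat).foldl
          (fun (row : List Int) (j : Nat) =>
            if PySem.Int.floordiv n 2 < |(k : Int) - PySem.Int.floordiv n 2| + |(j : Int) - PySem.Int.floordiv n 2| then
              row.set j (-1)
            else row) (b.getD k [])))
      (List.map (fun _ => List.map (fun _ => (1 : Int)) (List.range n.toNat)) (List.range n.toNat)) := by
    apply pv_foldl_congr_inv (fun b => b.length = n.toNat)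
    · simp
    · intro a k ha hk
      rw [pv_foldl_length_inv _ (fun b x => by split <;> simp)]
      exact ha
    · intro a k ha hk
      exact pv_inner_collapse []
        (fun (j : Nat) => PySem.Int.floordiv n 2 < |(k : Int) - PySem.Int.floordiv n 2| + |(j : Int) - PySem.Int.floordiv n 2|)
        (fun (row : List Int) (j : Nat) => row.set j (-1)) (List.range n.toNat) a k
        (by rw [ha]; exact List.mem_range.mp hk)
  rw [hA1,
    pv_foldl_set_getD_range [] (fun (k : Nat) (row : List Int) =>
      (List.range n.toNat).foldl
        (fun (row : List Int) (j : Nat) =>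
          if PySem.Int.floordiv n 2 < |(k : Int) - PySem.Int.floordiv n 2| + |(j : Int) - PySem.Int.floordiv n 2| then
            row.set j (-1)
          else row) row)
      n.toNat _ (by simp),
    pv_foldl_set_getD_range [] (fun (k : Nat) (row : List Int) =>
      PySem.List.slice row none (some (PySem.Int.floordiv n 2 - (PySem.Int.floordiv n 2 - |(k : Int) - PySem.Int.floordiv n 2|))) ++
        List.replicate ((min (n - 1) (PySem.Int.floordiv n 2 + (PySem.Int.floordiv n 2 - |(k : Int) - PySem.Int.floordiv n 2|)) -
            (PySem.Int.floordiv n 2 - (PySem.Int.floordiv n 2 - |(k : Int) - PySem.Int.floordiv n 2|)) + 1)).toNat (1 : Int) ++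
        PySem.List.slice row (some (min (n - 1) (PySem.Int.floordiv n 2 + (PySem.Int.floordiv n 2 - |(k : Int) - PySem.Int.floordiv n 2|)) + 1)) none)
      n.toNat _ (by simp)]
  rw [List.take_of_length_le (by simp), List.take_of_length_le (by simp),
    List.drop_eq_nil_of_le (by simp), List.drop_eq_nil_of_le (by simp),
    List.append_nil, List.append_nil]
  apply List.ext_getElem
  · simp
  · intro k h1 h2
    simp only [List.getElem_mapIdx, List.getElem_map]
    exact pv_row_eq n hn k (by simpa using h1)

-- ===== VERDICT (by name: the statement is the Claim_ definition above) =====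
theorem build_diamond_board_py_spec : Claim_equal_build_diamond_board_py := by
  intro n _ hn
  unfold Spec_build_diamond_board_py build_diamond_board_py build_diamond_board_py_alt
  simp only []
  rw [pv_boards_eq n hn]
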